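-- pv_equiv track=rewrite | github.com/AvailableNameWill/examen3ParcialSA | Ejercicio#2/exer.py | desencript
-- ===== SOURCE A (Python) =====
-- dict = {}
--
-- def desencript(encripted, unknown):
--     decript = []
--
--     for i, enchar in enumerate(encripted):
--         if enchar == 'N' and unknown:
--             decript.append(unknown.pop(0))
--         else:
--             decript.append(dict.get(enchar, enchar))
--     return ''.join(decript)
-- ===== SOURCE B (Python) =====
-- def desencript(encripted, unknown):
--     # Split once on 'N' and stitch the pieces back with the queued fills
--     # (a fill per 'N', 'N' itself again once the queue runs dry).
--     parts = encripted.split('N')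
--     m = min(len(parts) - 1, len(unknown))
--     fills = unknown[:m] + ['N'] * (len(parts) - 1 - m)
--     del unknown[:m]
--     pieces = [parts[0]]
--     for fill, part in zip(fills, parts[1:]):
--         pieces.append(fill)
--         pieces.append(part)
--     return ''.join(pieces)
-- ===== Notes on version B (the rewrite author's own statement) =====
-- stated objective: alternative
-- what changed: B replaces A's per-character enumerate loop (append char or popped fill one by one) with a single split of the string on 'N' and a stitch-back of the pieces interleaved with the queued fills, padding with 'N' once the queue is exhausted.
import Mathlib
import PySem

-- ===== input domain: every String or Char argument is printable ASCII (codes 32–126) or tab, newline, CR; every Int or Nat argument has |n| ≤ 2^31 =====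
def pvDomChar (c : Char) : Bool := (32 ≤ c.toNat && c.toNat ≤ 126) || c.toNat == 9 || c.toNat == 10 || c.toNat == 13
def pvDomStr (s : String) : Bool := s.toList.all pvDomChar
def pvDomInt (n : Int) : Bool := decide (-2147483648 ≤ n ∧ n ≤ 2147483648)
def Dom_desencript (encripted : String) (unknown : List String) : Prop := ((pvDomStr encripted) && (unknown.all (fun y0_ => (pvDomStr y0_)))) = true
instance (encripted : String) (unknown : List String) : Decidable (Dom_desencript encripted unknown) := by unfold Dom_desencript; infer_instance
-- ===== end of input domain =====

-- B replaces A's per-character loop by a single split on 'N' plus a stitch-back of the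
-- pieces (objective: alternative decomposition, same cost). A pops consumed fills from
-- `unknown` in place; B performs the same mutation (`del unknown[:m]`) — the theorems
-- below are about the return value.

-- ===== PORT A =====
-- the module-global `dict = {}` A looks characters up in
def pvDictA : PySem.Dict Char String := PySem.Dict.empty

-- the for-loop over enumerate(encripted), state = (unknown, decript)
def desencriptLoop (chars : List Char) (unknown : List String) (decript : List String) : List String :=
  match chars with
  | [] => decript
  | c :: rest =>
    if c == 'N' && !unknown.isEmpty then
      desencriptLoop rest unknown.tail (decript ++ [unknown.headD ""])
    else
      desencriptLoop rest unknown (decript ++ [PySem.Dict.getD pvDictA c (String.singleton c)])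

def desencript (encripted : String) (unknown : List String) : String :=
  PySem.Str.join "" (desencriptLoop encripted.toList unknown [])

-- ===== PORT B =====
def desencript_alt (encripted : String) (unknown : List String) : String :=
  let parts := (PySem.Str.split? encripted "N").getD []   -- sep "N" ≠ "": never none
  let m := min (parts.length - 1) unknown.length
  let fills := unknown.take m ++ List.replicate (parts.length - 1 - m) "N"
  let pieces := (fills.zip parts.tail).foldl
    (fun acc (fp : String × String) => acc ++ [fp.1, fp.2]) [parts.headD ""]
  PySem.Str.join "" pieces

-- ===== PRECONDITION & SPEC =====
def Spec_desencript (encripted : String) (unknown : List String) (out : String) : Prop := out = desencript_alt encripted unknown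
instance (encripted : String) (unknown : List String) (out : String) : Decidable (Spec_desencript encripted unknown out) := by unfold Spec_desencript; infer_instance

-- ===== CLAIM (what is proved, stated in full; the proofs are below) =====
def Claim_equal_desencript : Prop := ∀ (encripted : String) (unknown : List String), Dom_desencript encripted unknown → Spec_desencript encripted unknown (desencript encripted unknown)

-- ===== LEMMAS AND PROOFS =====

-- the common clean recursion both programs compute (as a list of pieces)
def pvF : List Char → List String → List String
  | [], _ => []
  | c :: cs, u =>
    if c = 'N' ∧ u ≠ [] then u.headD "" :: pvF cs u.tail
    else String.singleton c :: pvF cs u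

-- recursive characterisation of Python split on the single character 'N'
def pvSplitN : List Char → List (List Char)
  | [] => [[]]
  | c :: cs =>
    if c = 'N' then [] :: pvSplitN cs
    else
      match pvSplitN cs with
      | p :: ps => (c :: p) :: ps
      | [] => [[c]]

lemma pvSplitN_ne_nil (l : List Char) : pvSplitN l ≠ [] := by
  cases l with
  | nil => simp [pvSplitN]
  | cons c cs =>
    simp only [pvSplitN]
    split_ifs
    · simp
    · cases h : pvSplitN cs <;> simp

lemma pvSplitN_cons_eq (l : List Char) :
    pvSplitN l = (pvSplitN l).headD [] :: (pvSplitN l).tail := by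
  cases h : pvSplitN l with
  | nil => exact absurd h (pvSplitN_ne_nil l)
  | cons p ps => simp

lemma splitOn_go_eq (fuel : ℕ) : ∀ (l cur : List Char) (acc : List (List Char)),
    l.length ≤ fuel →
    PySem.Chars.splitOn.go ['N'] fuel l cur acc
      = acc.reverse ++ (cur.reverse ++ (pvSplitN l).headD []) :: (pvSplitN l).tail := by
  induction fuel with
  | zero =>
    intro l cur acc h
    have hl : l = [] := List.eq_nil_of_length_eq_zero (Nat.le_zero.mp h)
    subst hl
    simp [PySem.Chars.splitOn.go, pvSplitN]
  | succ fuel ih =>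
    intro l cur acc h
    cases l with
    | nil => simp [PySem.Chars.splitOn.go, pvSplitN]
    | cons c rest =>
      simp only [PySem.Chars.splitOn.go]
      by_cases hc : c = 'N'
      · subst hc
        have hpre : List.isPrefixOf ['N'] ('N' :: rest) = true := by
          simp [List.isPrefixOf]
        rw [if_pos hpre]
        have hdrop : List.drop (['N'] : List Char).length ('N' :: rest) = rest := by simp
        rw [hdrop, ih rest [] (cur.reverse :: acc) (by simpa using Nat.le_of_succ_le_succ h)]
        simp only [pvSplitN]
        cases hs : pvSplitN rest with
        | nil => exact absurd hs (pvSplitN_ne_nil rest)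
        | cons p ps => simp
      · have hpre : List.isPrefixOf ['N'] (c :: rest) = false := by
          cases h1 : List.isPrefixOf ['N'] (c :: rest) with
          | false => rfl
          | true =>
            exfalso
            have := (List.isPrefixOf_iff_prefix.mp h1)
            rcases this with ⟨t, ht⟩
            exact hc (by simpa using congrArg (fun l => l.headD ' ') ht.symm)
        rw [if_neg (by simp [hpre])]
        rw [ih rest (c :: cur) acc (by simpa using Nat.le_of_succ_le_succ h)]
        simp only [pvSplitN, if_neg hc]
        cases hs : pvSplitN rest with
        | nil => exact absurd hs (pvSplitN_ne_nil rest)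
        | cons p ps => simp

lemma splitOn_eq_pvSplitN (l : List Char) :
    PySem.Chars.splitOn l ['N'] = pvSplitN l := by
  unfold PySem.Chars.splitOn
  rw [splitOn_go_eq (l.length + 1) l [] [] (Nat.le_succ _)]
  simpa using (pvSplitN_cons_eq l).symm

-- A's loop is pvF with an accumulator
lemma desencriptLoop_eq (chars : List Char) : ∀ (u acc : List String),
    desencriptLoop chars u acc = acc ++ pvF chars u := by
  induction chars with
  | nil => intro u acc; simp [desencriptLoop, pvF]
  | cons c cs ih =>
    intro u acc
    simp only [desencriptLoop, pvF]
    by_cases h : c = 'N' ∧ u ≠ []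
    · rw [if_pos (by simp [h.1, h.2]), if_pos h, ih]
      simp
    · rw [if_neg (by
        rcases not_and_or.mp h with h1 | h2
        · simp [h1]
        · simp [not_not.mp h2]), if_neg h, ih]
      simp [PySem.Dict.getD, pvDictA, PySem.Dict.empty, PySem.Dict.get?]

-- the flattened characters of B's stitched pieces equal those of pvF
lemma glue_eq (chars : List Char) : ∀ (u : List String),
    ((pvSplitN chars).headD [] ++
      (((u.take (min ((pvSplitN chars).length - 1) u.length)
          ++ List.replicate ((pvSplitN chars).length - 1
              - min ((pvSplitN chars).length - 1) u.length) "N").zip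
        ((pvSplitN chars).tail.map String.ofList)).flatMap
          (fun fp => fp.1.toList ++ fp.2.toList)))
      = (pvF chars u).flatMap String.toList := by
  induction chars with
  | nil => intro u; simp [pvSplitN, pvF]
  | cons c cs ih =>
    intro u
    cases hs : pvSplitN cs with
    | nil => exact absurd hs (pvSplitN_ne_nil cs)
    | cons p ps =>
      by_cases hc : c = 'N'
      · subst hc
        cases u with
        | nil =>
          have ih0 := ih []
          rw [hs] at ih0
          simp only [List.headD_cons, List.tail_cons, List.length_cons,
            Nat.add_sub_cancel, List.length_nil, Nat.min_zero, List.take_zero,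
            Nat.sub_zero, List.nil_append] at ih0
          simp only [pvSplitN, hs, pvF, List.headD_cons, List.tail_cons,
            List.length_cons, List.length_nil, Nat.min_zero, List.take_zero,
            Nat.sub_zero, List.nil_append, Nat.add_sub_cancel,
            List.replicate_succ, List.map_cons, List.zip_cons_cons,
            List.flatMap_cons, if_true]
          rw [if_neg (by simp)]
          simp only [List.flatMap_cons]
          rw [← ih0]
          simp [String.singleton]
        | cons v us =>
          have ihus := ih us
          rw [hs] at ihus
          simp only [List.headD_cons, List.tail_cons, List.length_cons,
            Nat.add_sub_cancel] at ihus
          have h2 : min (ps.length + 1) (us.length + 1)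
              = min ps.length us.length + 1 := by omega
          have h3 : ps.length + 1 - (min ps.length us.length + 1)
              = ps.length - min ps.length us.length := by omega
          simp only [pvSplitN, hs, pvF, if_true, List.headD_cons,
            List.tail_cons, List.length_cons, Nat.add_sub_cancel, h2, h3,
            List.take_succ_cons, List.cons_append, List.map_cons,
            List.zip_cons_cons, List.flatMap_cons]
          rw [if_pos (by simp)]
          simp only [List.flatMap_cons]
          rw [← ihus]
          simp
      · have ihu := ih u
        rw [hs] at ihu
        simp only [List.headD_cons, List.tail_cons, List.length_cons,
          Nat.add_sub_cancel] at ihu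
        simp only [pvSplitN, if_neg hc, hs, pvF, List.headD_cons,
          List.tail_cons, List.length_cons, Nat.add_sub_cancel]
        rw [if_neg (by simp [hc])]
        simp only [List.flatMap_cons]
        rw [← ihu]
        simp [String.singleton]

lemma join_empty_eq (xs : List String) :
    PySem.Str.join "" xs = String.ofList (xs.flatMap String.toList) := by
  simp only [PySem.Str.join, PySem.Chars.join]
  congr 1
  have : ("" : String).toList = [] := rfl
  rw [this]
  induction xs with
  | nil => simp [List.intercalate]
  | cons x xs ih =>
    cases xs with
    | nil => simp [List.intercalate]
    | cons y ys =>
      simp only [List.map_cons, List.intercalate, List.intersperse] at ih ⊢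
      simp_all

lemma pvFlatMap_pairs (zs : List (String × String)) :
    List.flatMap String.toList (zs.flatMap (fun fp => [fp.1, fp.2]))
      = zs.flatMap (fun fp => fp.1.toList ++ fp.2.toList) := by
  induction zs with
  | nil => simp
  | cons q qs ih => simp [ih]

-- ===== VERDICT (by name: the statement is the Claim_ definition above) =====
theorem desencript_spec : Claim_equal_desencript := by
  intro encripted unknown _
  unfold Spec_desencript desencript desencript_alt
  rw [desencriptLoop_eq, List.nil_append, join_empty_eq, join_empty_eq]
  congr 1
  have hsplit : (PySem.Str.split? encripted "N").getD []
      = (pvSplitN encripted.toList).map String.ofList := by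
    have hN : ("N" : String).toList = ['N'] := rfl
    simp [PySem.Str.split?, PySem.Chars.split?, hN, splitOn_eq_pvSplitN]
  rw [hsplit]
  rw [PySem.List.foldl_append_eq_flatMap (fun fp : String × String => [fp.1, fp.2])]
  have hlen : ((pvSplitN encripted.toList).map String.ofList).length
      = (pvSplitN encripted.toList).length := by simp
  have htail : ((pvSplitN encripted.toList).map String.ofList).tail
      = (pvSplitN encripted.toList).tail.map String.ofList := by
    rw [pvSplitN_cons_eq encripted.toList]; simp
  have hhead : ((pvSplitN encripted.toList).map String.ofList).headD ""
      = String.ofList ((pvSplitN encripted.toList).headD []) := by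
    rw [pvSplitN_cons_eq encripted.toList]; simp
  rw [hlen, htail, hhead]
  rw [← glue_eq encripted.toList unknown]
  simp only [List.flatMap_cons, List.flatMap_append]
  rw [String.toList_ofList]
  rw [pvFlatMap_pairs]
  simp
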